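-- pv_equiv track=rewrite | github.com/leored/kb-engine | src/kb_engine/utils/markdown.py | parse_markdown_sections
-- ===== SOURCE A (Python) =====
-- def parse_markdown_sections(
--     content: str,
-- ) -> list[tuple[list[str], str]]:
--     """Parse markdown content into sections with heading paths.
--
--     Returns a list of (heading_path, section_content) tuples.
--     """
--     sections: list[tuple[list[str], str]] = []
--     current_path: list[str] = []
--     current_content: list[str] = []
--     current_levels: list[int] = []
--
--     lines = content.split("\n")
--
--     for line in lines:
--         if line.startswith("#"):
--             # Save previous section
--             section_text = "\n".join(current_content).strip()
--             if section_text: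
--                 sections.append((list(current_path), section_text))
--             current_content = []
--
--             # Parse heading
--             level = len(line) - len(line.lstrip("#"))
--             heading_text = line.lstrip("#").strip()
--
--             # Update path
--             while current_levels and current_levels[-1] >= level:
--                 current_levels.pop()
--                 if current_path:
--                     current_path.pop()
--
--             current_path.append(heading_text)
--             current_levels.append(level)
--         else:
--             current_content.append(line)
--
--     # Don't forget last section
--     section_text = "\n".join(current_content).strip()
--     if section_text:
--         sections.append((list(current_path), section_text))
--
--     return sections
-- ===== SOURCE B (Python) =====
-- def parse_markdown_sections(
--     content: str,
-- ) -> list[tuple[list[str], str]]: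
--     """Parse markdown content into sections with heading paths.
--
--     Recursive decomposition: split off the leading non-heading block, emit it
--     under the current heading stack, then recurse past the next heading.
--     """
--     return _sections(content.split("\n"), [])
--
--
-- def _sections(
--     lines: list[str], stack: list[tuple[int, str]]
-- ) -> list[tuple[list[str], str]]:
--     i = 0
--     while i < len(lines) and not lines[i].startswith("#"):
--         i += 1
--     out: list[tuple[list[str], str]] = []
--     text = "\n".join(lines[:i]).strip()
--     if text:
--         out.append(([t for _, t in stack], text))
--     if i == len(lines):
--         return out
--     line = lines[i]
--     stripped = line.lstrip("#")
--     level = len(line) - len(stripped)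
--     while stack and stack[-1][0] >= level:
--         stack = stack[:-1]
--     return out + _sections(lines[i + 1 :], stack + [(level, stripped.strip())])
-- ===== Notes on version B (the rewrite author's own statement) =====
-- stated objective: alternative
-- what changed: Replaces A's single interleaved fold with mutable save-then-update state (parallel path/levels lists, pending content buffer) by a recursive decomposition: split off the leading non-heading block, emit it under a single stack of (level, text) pairs, and recurse past the next heading, building the output by concatenation.
import Mathlib
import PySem

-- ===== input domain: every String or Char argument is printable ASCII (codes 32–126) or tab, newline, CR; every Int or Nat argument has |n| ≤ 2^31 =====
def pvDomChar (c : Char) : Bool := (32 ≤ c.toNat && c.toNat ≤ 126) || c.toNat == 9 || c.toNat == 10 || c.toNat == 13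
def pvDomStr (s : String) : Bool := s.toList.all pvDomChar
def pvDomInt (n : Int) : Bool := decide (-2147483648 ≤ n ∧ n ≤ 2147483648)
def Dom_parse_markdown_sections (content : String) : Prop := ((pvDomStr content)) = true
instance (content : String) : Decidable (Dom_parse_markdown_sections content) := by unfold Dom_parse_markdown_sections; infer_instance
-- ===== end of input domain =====

-- B replaces A's interleaved fold (parallel path/levels lists, pending buffer) by a
-- recursive block-splitting decomposition over one (level, text) stack; same results, same cost.


-- ===== PORT A =====
-- shared primitives ('line.startswith("#")', 'line.lstrip("#")' (dropping the single char '#' is exact),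
-- 'len(line) - len(stripped)', '.lstrip("#").strip()', '"\n".join(block).strip()')
def pvIsHeading (l : List Char) : Bool := PySem.Chars.startswith l ['#']
def pvLstripHash (l : List Char) : List Char := l.dropWhile (· == '#')
def pvLevel (l : List Char) : Int := (l.length : Int) - ((pvLstripHash l).length : Int)
def pvHeadText (l : List Char) : String := String.ofList (PySem.Chars.strip (pvLstripHash l))
def pvJoinStrip (ls : List (List Char)) : String := String.ofList (PySem.Chars.strip (PySem.Chars.join ['\n'] ls))

-- A's repeated 'section_text = "\n".join(current_content).strip(); if section_text: sections.append(...)'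
def pvFlush (secs : List (List String × String)) (path : List String) (cont : List (List Char)) :
    List (List String × String) :=
  let t := pvJoinStrip cont
  if t ≠ "" then secs ++ [(path, t)] else secs

-- A's 'while current_levels and current_levels[-1] >= level: current_levels.pop(); if current_path: current_path.pop()'
def pvPopA (path : List String) (lvls : List Int) (level : Int) : List String × List Int :=
  if h : lvls = [] then (path, lvls)
  else if level ≤ lvls.getLast h then
    pvPopA (if path.isEmpty then path else path.dropLast) lvls.dropLast level
  else (path, lvls)
termination_by lvls.length
decreasing_by
  have := List.length_pos_of_ne_nil h
  simp only [List.length_dropLast]; omega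

-- the body of A's 'for line in lines:'
def pvStepA (st : List (List String × String) × List String × List (List Char) × List Int)
    (line : List Char) : List (List String × String) × List String × List (List Char) × List Int :=
  let (secs, path, cont, lvls) := st
  if pvIsHeading line then
    let secs := pvFlush secs path cont
    let level := pvLevel line
    let (path, lvls) := pvPopA path lvls level
    (secs, path ++ [pvHeadText line], ([] : List (List Char)), lvls ++ [level])
  else
    (secs, path, cont ++ [line], lvls)

def parse_markdown_sections (content : String) : List (List String × String) :=
  let lines := PySem.Chars.splitOn content.toList ['\n']
  let (secs, path, cont, _) := lines.foldl pvStepA ([], [], [], [])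
  pvFlush secs path cont

-- ===== PORT B =====
-- B's leading scan 'i = 0; while i < len(lines) and not lines[i].startswith("#"): i += 1'
-- together with the slices lines[:i] / lines[i:]: returns (lines[:i], lines[i:])
def pvSplitBlock (lines : List (List Char)) : List (List Char) × List (List Char) :=
  match lines with
  | [] => ([], [])
  | l :: ls =>
    if pvIsHeading l then ([], l :: ls)
    else
      let (b, r) := pvSplitBlock ls
      (l :: b, r)

-- B's 'while stack and stack[-1][0] >= level: stack = stack[:-1]'
def pvPopB (stack : List (Int × String)) (level : Int) : List (Int × String) :=
  if h : stack = [] then []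
  else if level ≤ (stack.getLast h).1 then pvPopB stack.dropLast level
  else stack
termination_by stack.length
decreasing_by
  have := List.length_pos_of_ne_nil h
  simp only [List.length_dropLast]; omega

theorem pvSplitBlock_snd_le (lines : List (List Char)) :
    (pvSplitBlock lines).2.length ≤ lines.length := by
  induction lines with
  | nil => simp [pvSplitBlock]
  | cons l ls ih =>
    simp only [pvSplitBlock]
    split
    · simp
    · simpa using Nat.le_succ_of_le ih

-- B's recursive helper _sections(lines, stack)
def pvSections (lines : List (List Char)) (stack : List (Int × String)) :
    List (List String × String) :=
  let block := (pvSplitBlock lines).1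
  let t := pvJoinStrip block
  let out := if t ≠ "" then [(stack.map Prod.snd, t)] else []
  match _h : (pvSplitBlock lines).2 with
  | [] => out
  | line :: ls =>
    let level := pvLevel line
    out ++ pvSections ls (pvPopB stack level ++ [(level, pvHeadText line)])
termination_by lines.length
decreasing_by
  have := pvSplitBlock_snd_le lines
  rw [_h] at this
  simpa using Nat.lt_of_lt_of_le (Nat.lt_succ_self _) this

def parse_markdown_sections_alt (content : String) : List (List String × String) :=
  pvSections (PySem.Chars.splitOn content.toList ['\n']) []

-- ===== PRECONDITION & SPEC =====
def Spec_parse_markdown_sections (content : String) (out : List (List String × String)) : Prop := out = parse_markdown_sections_alt content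
instance (content : String) (out : List (List String × String)) : Decidable (Spec_parse_markdown_sections content out) := by unfold Spec_parse_markdown_sections; infer_instance

-- ===== CLAIM (what is proved, stated in full; the proofs are below) =====
def Claim_equal_parse_markdown_sections : Prop := ∀ (content : String), Dom_parse_markdown_sections content → Spec_parse_markdown_sections content (parse_markdown_sections content)

-- ===== LEMMAS AND PROOFS =====

-- pvSplitBlock skips a non-heading prefix
theorem pvSplitBlock_append (cont rest : List (List Char))
    (h : ∀ l ∈ cont, pvIsHeading l = false) :
    pvSplitBlock (cont ++ rest) = (cont ++ (pvSplitBlock rest).1, (pvSplitBlock rest).2) := by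
  induction cont with
  | nil => simp
  | cons c cs ih =>
    have hc : pvIsHeading c = false := h c (by simp)
    simp only [List.cons_append, pvSplitBlock, hc, Bool.false_eq_true, if_false]
    rw [ih (fun l hl => h l (by simp [hl]))]

-- case unfoldings of B's recursion
theorem pvSections_of_snd_nil (lines : List (List Char)) (stack : List (Int × String))
    (h : (pvSplitBlock lines).2 = []) :
    pvSections lines stack
      = (if pvJoinStrip (pvSplitBlock lines).1 ≠ "" then
          [(stack.map Prod.snd, pvJoinStrip (pvSplitBlock lines).1)] else []) := by
  rw [pvSections]
  split
  · rfl
  · simp_all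

theorem pvSections_of_snd_cons (lines : List (List Char)) (stack : List (Int × String))
    (line : List Char) (ls : List (List Char))
    (h : (pvSplitBlock lines).2 = line :: ls) :
    pvSections lines stack
      = (if pvJoinStrip (pvSplitBlock lines).1 ≠ "" then
          [(stack.map Prod.snd, pvJoinStrip (pvSplitBlock lines).1)] else [])
        ++ pvSections ls (pvPopB stack (pvLevel line) ++ [(pvLevel line, pvHeadText line)]) := by
  rw [pvSections]
  split
  · simp_all
  · rename_i line' ls' h'
    rw [h] at h'
    obtain ⟨rfl, rfl⟩ := List.cons.inj h'
    rfl

-- A's parallel-list pop loop computes B's pair-stack pop loop, componentwise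
theorem pvPopA_eq_pvPopB (stack : List (Int × String)) (level : Int) :
    pvPopA (stack.map Prod.snd) (stack.map Prod.fst) level
      = ((pvPopB stack level).map Prod.snd, (pvPopB stack level).map Prod.fst) := by
  induction hn : stack.length using Nat.strong_induction_on generalizing stack with
  | _ n ih =>
    rw [pvPopA, pvPopB]
    by_cases hs : stack = []
    · subst hs; simp
    · have hmf : stack.map Prod.fst ≠ [] := by simpa using hs
      rw [dif_neg hmf, dif_neg hs, List.getLast_map]
      split
      · have he : (stack.map Prod.snd).isEmpty = false := by simp [hs]
        rw [he]
        rw [← List.map_dropLast, ← List.map_dropLast]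
        simp only [Bool.false_eq_true, if_false]
        exact ih stack.dropLast.length
          (by subst hn; simp only [List.length_dropLast]
              exact Nat.sub_lt (List.length_pos_of_ne_nil hs) Nat.one_pos) _ rfl
      · rfl

-- the main invariant: A's fold from a stack-shaped state, then the final flush,
-- equals the already-emitted sections followed by B's recursion on the pending block
theorem pv_main (lines : List (List Char)) (cont : List (List Char))
    (stack : List (Int × String)) (secs : List (List String × String))
    (hc : ∀ l ∈ cont, pvIsHeading l = false) :
    pvFlush (lines.foldl pvStepA (secs, stack.map Prod.snd, cont, stack.map Prod.fst)).1
        (lines.foldl pvStepA (secs, stack.map Prod.snd, cont, stack.map Prod.fst)).2.1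
        (lines.foldl pvStepA (secs, stack.map Prod.snd, cont, stack.map Prod.fst)).2.2.1
      = secs ++ pvSections (cont ++ lines) stack := by
  induction lines generalizing cont stack secs with
  | nil =>
    have hsb : pvSplitBlock (cont ++ ([] : List (List Char))) = (cont, []) := by
      rw [pvSplitBlock_append cont [] hc]; simp [pvSplitBlock]
    rw [List.foldl_nil, pvSections_of_snd_nil _ _ (by rw [hsb])]
    rw [hsb]
    simp only [pvFlush]
    split
    · rfl
    · simp
  | cons l ls ih =>
    by_cases hl : pvIsHeading l = true
    · have hsb : pvSplitBlock (cont ++ l :: ls) = (cont, l :: ls) := by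
        rw [pvSplitBlock_append cont (l :: ls) hc]; simp [pvSplitBlock, hl]
      rw [pvSections_of_snd_cons _ _ l ls (by rw [hsb])]
      rw [hsb]
      simp only [List.foldl_cons, pvStepA, hl, if_true]
      rw [pvPopA_eq_pvPopB]
      have := ih ([] : List (List Char))
        (pvPopB stack (pvLevel l) ++ [(pvLevel l, pvHeadText l)])
        (pvFlush secs (stack.map Prod.snd) cont) (by simp)
      simp only [List.map_append, List.map_cons, List.map_nil, List.nil_append] at this
      rw [this]
      simp only [pvFlush]
      split
      · simp
      · simp
    · have hl' : pvIsHeading l = false := by simpa using hl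
      simp only [List.foldl_cons, pvStepA, hl', Bool.false_eq_true, if_false]
      have hc' : ∀ x ∈ cont ++ [l], pvIsHeading x = false := by
        intro x hx
        rcases List.mem_append.mp hx with h | h
        · exact hc x h
        · simp only [List.mem_singleton] at h; subst h; exact hl'
      have := ih (cont ++ [l]) stack secs hc'
      rw [this, List.append_assoc]
      simp

-- ===== VERDICT (by name: the statement is the Claim_ definition above) =====
theorem parse_markdown_sections_spec : Claim_equal_parse_markdown_sections := by
  intro content _
  unfold Spec_parse_markdown_sections parse_markdown_sections parse_markdown_sections_alt
  have := pv_main (PySem.Chars.splitOn content.toList ['\n']) [] [] [] (by simp)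
  simp only [List.map_nil, List.nil_append] at this
  exact this
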